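-- pv_equiv track=rewrite | github.com/catturtle123/algorithms | 프로그래머스/2/60058. 괄호 변환/괄호 변환.py | dfs
-- ===== SOURCE A (Python) =====
-- def isCorrect(w):
--     count = 0
--     for i in w:
--         if i == "(":
--             count += 1
--         else:
--             count  -= 1
--
--         if count < 0:
--             return False
--
--     if count == 0:
--         return True
--     else:
--         return False
--
-- def dfs(w):
--     # 1단계
--     if w == "":
--         return ""
--
--     count = 0
--     u = ""
--     v = ""
--     for i in range(len(w)):
--         if w[i] == "(":
--             count += 1
--         else:
--             count -= 1
--
--         if count == 0:
--             u = w[:i + 1]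
--             v = w[i + 1:]
--             break
--
--     if u == "":
--         u = w
--         v = ""
--
--     if isCorrect(u):
--         u += dfs(v)
--         return u
--     else:
--         temp = "("
--         temp += dfs(v)
--         temp += ")"
--         u = u[1:-1]
--
--         temp2 = ""
--         for i in u:
--             if i == "(":
--                 temp2 += ")"
--             else:
--                 temp2 += "("
--
--         temp += temp2
--
--         return temp
-- ===== SOURCE B (Python) =====
-- def dfs(w):
--     # Non-recursive, two flat passes: one global-balance scan marks the
--     # decomposition of w into segments ending where the running balance
--     # returns to 0 (plus an unbalanced trailing segment, if any); then each
--     # segment independently contributes a prefix piece and a suffix piece --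
--     # the nested "(" ... ")" + flipped-interior structure of the answer is
--     # exactly the prefix pieces in order followed by the suffix pieces in
--     # reverse order, each joined once.
--     n = len(w)
--     segs = []
--     bal = 0
--     start = 0
--     for i in range(n):
--         bal += 1 if w[i] == "(" else -1
--         if bal == 0:
--             segs.append((start, i + 1, True))
--             start = i + 1
--     if start < n:
--         segs.append((start, n, False))
--     pre = []
--     suf = []
--     for a, b, closed in segs:
--         if closed and w[a] == "(":
--             pre.append(w[a:b])
--             suf.append("")
--         else:
--             pre.append("(")
--             suf.append(")" + "".join(")" if w[k] == "(" else "(" for k in range(a + 1, b - 1)))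
--     return "".join(pre) + "".join(reversed(suf))
-- ===== Notes on version B (the rewrite author's own statement) =====
-- stated objective: alternative
-- what changed: B is non-recursive: one global-balance scan computes the whole segment decomposition of w at once (A re-derives each split by a fresh per-call loop plus a second isCorrect rescan of u), and a second flat pass emits an independent prefix piece and suffix piece per segment, the answer being the prefix pieces in order followed by the suffix pieces in reverse, each joined once.
import Mathlib
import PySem

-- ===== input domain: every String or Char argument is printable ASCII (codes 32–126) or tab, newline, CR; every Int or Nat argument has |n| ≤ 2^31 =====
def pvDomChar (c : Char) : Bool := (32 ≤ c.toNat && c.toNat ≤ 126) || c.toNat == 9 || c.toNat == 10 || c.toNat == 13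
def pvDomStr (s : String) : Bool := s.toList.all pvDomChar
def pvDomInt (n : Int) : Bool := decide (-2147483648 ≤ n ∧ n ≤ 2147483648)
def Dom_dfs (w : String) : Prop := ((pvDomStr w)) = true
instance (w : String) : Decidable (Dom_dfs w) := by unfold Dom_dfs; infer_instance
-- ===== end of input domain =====

-- B replaces A's recursive slice-and-rescan by two flat passes: one global-balance
-- scan computing the segment decomposition, then independent prefix/suffix pieces
-- joined once (objective: alternative, no recursion).


-- ===== PORT A =====
-- A's isCorrect: running count, early False on count < 0, final count == 0.
def isCorrectL : List Char → Int → Bool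
  | [], count => count == 0
  | c :: rest, count =>
    let count := count + (if c = '(' then 1 else -1)
    if count < 0 then false else isCorrectL rest count

-- A's first loop ("for i in range(len(w)) … break"): index of the first position
-- where the running count hits 0 (none if the loop never breaks, i.e. u stays "").
def findSplit : List Char → Int → Option Nat
  | [], _ => none
  | c :: rest, count =>
    let count := count + (if c = '(' then 1 else -1)
    if count = 0 then some 0 else (findSplit rest count).map (· + 1)

-- dfs on the character list; the slices w[:i+1], w[i+1:], u[1:-1] are take/drop
-- (exact here: the indices are non-negative and u ≠ "" makes u[1:-1] = (u.drop 1).take (u.length - 2)).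
def dfsL (l : List Char) : List Char :=
  if _h : l = [] then []
  else
    let uv := match findSplit l 0 with
      | some i => (l.take (i + 1), l.drop (i + 1))
      | none => (l, ([] : List Char))
    let u := uv.1
    let v := uv.2
    if isCorrectL u 0 then u ++ dfsL v
    else ('(' :: dfsL v ++ [')']) ++
      ((u.drop 1).take (u.length - 2)).map (fun c => if c = '(' then ')' else '(')
termination_by l.length
decreasing_by
  all_goals
    rcases findSplit l 0 with _ | i <;>
      simp_all [List.length_pos_iff, List.ne_nil_iff_exists_cons]

def dfs (w : String) : String := String.ofList (dfsL w.toList)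

-- ===== PORT B =====
-- B pass 1: one global-balance scan; emits (start, end, True) whenever the
-- running balance returns to 0, returns the pending segment start as well.
def segScan : List Char → Int → Nat → Nat → List (Nat × Nat × Bool) × Nat
  | [], _, _, start => ([], start)
  | c :: rest, bal, i, start =>
    let bal := bal + (if c = '(' then 1 else -1)
    if bal = 0 then
      let r := segScan rest bal (i + 1) (i + 1)
      ((start, i + 1, true) :: r.1, r.2)
    else segScan rest bal (i + 1) start

def segsB (w : List Char) : List (Nat × Nat × Bool) :=
  let r := segScan w 0 0 0
  if r.2 < w.length then r.1 ++ [(r.2, w.length, false)] else r.1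

def flipC (c : Char) : Char := if c = '(' then ')' else '('

-- B pass 2 (the loop appending to pre and suf); w[a] is head of drop a — exact,
-- every segment satisfies a < len w.  Slices are take/drop with non-negative indices.
def emitB (w : List Char) : List (Nat × Nat × Bool) → List (List Char) × List (List Char)
  | [] => ([], [])
  | (a, b, closed) :: rest =>
    let r := emitB w rest
    if closed && ((w.drop a).head? == some '(') then
      (((w.drop a).take (b - a)) :: r.1, [] :: r.2)
    else
      (['('] :: r.1, (')' :: ((w.drop (a + 1)).take (b - 1 - (a + 1))).map flipC) :: r.2)

def dfs_alt (w : String) : String :=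
  let l := w.toList
  let e := emitB l (segsB l)
  String.ofList (e.1.flatten ++ e.2.reverse.flatten)

-- ===== PRECONDITION & SPEC =====
def Spec_dfs (w : String) (out : String) : Prop := out = dfs_alt w
instance (w : String) (out : String) : Decidable (Spec_dfs w out) := by unfold Spec_dfs; infer_instance

-- ===== CLAIM (what is proved, stated in full; the proofs are below) =====
def Claim_equal_dfs : Prop := ∀ (w : String), Dom_dfs w → Spec_dfs w (dfs w)

-- ===== LEMMAS AND PROOFS =====

-- the split index lies inside the list
theorem findSplit_lt (l : List Char) (bal : Int) (k : Nat)
    (h : findSplit l bal = some k) : k < l.length := by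
  induction l generalizing bal k with
  | nil => simp [findSplit] at h
  | cons c rest ih =>
    simp only [findSplit] at h
    generalize hd : bal + (if c = '(' then 1 else -1) = d at h
    by_cases h0 : d = 0
    · rw [if_pos h0] at h; cases h; simp
    · rw [if_neg h0] at h
      rcases Option.map_eq_some_iff.mp h with ⟨j, hj, rfl⟩
      have := ih _ _ hj
      simp
      omega

-- when the balance never returns to 0 the scan emits nothing and keeps start
theorem segScan_none (l : List Char) (bal : Int) (i start : Nat)
    (h : findSplit l bal = none) : segScan l bal i start = ([], start) := by
  induction l generalizing bal i start with
  | nil => simp [segScan]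
  | cons c rest ih =>
    simp only [findSplit] at h
    simp only [segScan]
    generalize hd : bal + (if c = '(' then 1 else -1) = d at h ⊢
    by_cases h0 : d = 0
    · rw [if_pos h0] at h; simp at h
    · rw [if_neg h0] at h ⊢
      exact ih _ _ _ (Option.map_eq_none_iff.mp h)

-- the scan's first emitted segment is A's first split
theorem segScan_some (l : List Char) (bal : Int) (i start k : Nat)
    (h : findSplit l bal = some k) :
    segScan l bal i start =
      ((start, i + k + 1, true) :: (segScan (l.drop (k + 1)) 0 (i + k + 1) (i + k + 1)).1,
       (segScan (l.drop (k + 1)) 0 (i + k + 1) (i + k + 1)).2) := by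
  induction l generalizing bal i start k with
  | nil => simp [findSplit] at h
  | cons c rest ih =>
    simp only [findSplit] at h
    simp only [segScan]
    generalize hd : bal + (if c = '(' then 1 else -1) = d at h ⊢
    by_cases h0 : d = 0
    · rw [if_pos h0] at h ⊢
      cases h
      rw [h0]
      simp
    · rw [if_neg h0] at h ⊢
      rcases Option.map_eq_some_iff.mp h with ⟨j, hj, rfl⟩
      rw [ih _ _ _ _ hj]
      have e1 : i + 1 + j + 1 = i + (j + 1) + 1 := by omega
      simp [e1]

-- the segment list from absolute position i
def segsFrom (w : List Char) (i : Nat) : List (Nat × Nat × Bool) :=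
  let r := segScan (w.drop i) 0 i i
  if r.2 < w.length then r.1 ++ [(r.2, w.length, false)] else r.1

theorem segsB_eq (w : List Char) : segsB w = segsFrom w 0 := by
  simp [segsB, segsFrom]

theorem segsFrom_empty (w : List Char) (i : Nat) (h : w.length ≤ i) :
    segsFrom w i = [] := by
  have : w.drop i = [] := List.drop_eq_nil_of_le h
  simp [segsFrom, this, segScan]
  omega

theorem segsFrom_none (w : List Char) (i : Nat) (hi : i < w.length)
    (h : findSplit (w.drop i) 0 = none) :
    segsFrom w i = [(i, w.length, false)] := by
  simp [segsFrom, segScan_none _ _ _ _ h, hi]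

theorem segsFrom_some (w : List Char) (i k : Nat)
    (h : findSplit (w.drop i) 0 = some k) :
    segsFrom w i = (i, i + k + 1, true) :: segsFrom w (i + k + 1) := by
  have hdd : (w.drop i).drop (k + 1) = w.drop (i + (k + 1)) := List.drop_drop
  have e : i + (k + 1) = i + k + 1 := by omega
  rw [e] at hdd
  rw [segsFrom, segScan_some _ _ _ _ _ h, hdd, segsFrom]
  split <;> simp

-- A-side: a minimal balanced segment starting from a positive count is correct
theorem isCorrect_pos (l : List Char) (count : Int) (k : Nat)
    (hc : 1 ≤ count) (h : findSplit l count = some k) :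
    isCorrectL (l.take (k + 1)) count = true := by
  induction l generalizing count k with
  | nil => simp [findSplit] at h
  | cons c rest ih =>
    simp only [findSplit] at h
    simp only [List.take_succ_cons, isCorrectL]
    generalize hd : count + (if c = '(' then 1 else -1) = d at h ⊢
    have hge : 0 ≤ d := by rw [← hd]; split <;> omega
    by_cases h0 : d = 0
    · rw [if_pos h0] at h
      cases h
      rw [h0]
      simp [isCorrectL]
    · rw [if_neg h0] at h
      rcases Option.map_eq_some_iff.mp h with ⟨j, hj, rfl⟩
      rw [if_neg (by omega)]
      exact ih _ _ (by omega) hj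

-- A-side: if the count never returns to 0 (and is nonzero) the segment is incorrect
theorem isCorrect_none (l : List Char) (count : Int)
    (hc : count ≠ 0) (h : findSplit l count = none) :
    isCorrectL l count = false := by
  induction l generalizing count with
  | nil => simp [isCorrectL, hc]
  | cons c rest ih =>
    simp only [findSplit] at h
    simp only [isCorrectL]
    generalize hd : count + (if c = '(' then 1 else -1) = d at h ⊢
    by_cases h0 : d = 0
    · rw [if_pos h0] at h; simp at h
    · rw [if_neg h0] at h
      split
      · rfl
      · exact ih _ h0 (Option.map_eq_none_iff.mp h)

-- main equivalence, generalized over the suffix start i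
theorem dfsL_eq_segs : ∀ (n : Nat) (w : List Char) (i : Nat), w.length ≤ i + n →
    dfsL (w.drop i) =
      (emitB w (segsFrom w i)).1.flatten ++ (emitB w (segsFrom w i)).2.reverse.flatten := by
  intro n
  induction n with
  | zero =>
    intro w i h
    rw [segsFrom_empty w i (by omega), List.drop_eq_nil_of_le (by omega)]
    rw [dfsL]
    simp [emitB]
  | succ n ih =>
    intro w i h
    by_cases hlen : w.length ≤ i
    · rw [segsFrom_empty w i hlen, List.drop_eq_nil_of_le hlen]
      rw [dfsL]
      simp [emitB]
    · rw [not_le] at hlen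
      obtain ⟨c, rest, hl⟩ := List.ne_nil_iff_exists_cons.mp
        (by simp [List.drop_eq_nil_iff]; omega : w.drop i ≠ [])
      rcases hf : findSplit (w.drop i) 0 with _ | k
      · -- no split: the whole suffix is one unbalanced segment
        rw [segsFrom_none w i hlen hf]
        rw [dfsL]
        rw [dif_neg (by simp [hl])]
        have hic : isCorrectL (w.drop i) 0 = false := by
          rw [hl] at hf ⊢
          simp only [findSplit] at hf
          simp only [isCorrectL]
          generalize hd : (0 : Int) + (if c = '(' then 1 else -1) = d at hf ⊢
          by_cases h0 : d = 0
          · rw [if_pos h0] at hf; simp at hf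
          · rw [if_neg h0] at hf
            split
            · rfl
            · exact isCorrect_none _ _ h0 (Option.map_eq_none_iff.mp hf)
        simp only [hf, hic]
        rw [dfsL]
        have hd1 : (w.drop i).drop 1 = w.drop (i + 1) := List.drop_drop
        have hln : (w.drop i).length = w.length - i := by simp
        have e2 : w.length - i - 2 = w.length - 1 - (i + 1) := by omega
        (simp [emitB, hd1, hln, e2]; rfl)
      · -- first segment [i, i+k+1)
        have hk := findSplit_lt _ _ _ hf
        have hkl : k + 1 ≤ w.length - i := by
          rw [List.length_drop] at hk
          omega
        rw [segsFrom_some w i k hf]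
        have hdd : (w.drop i).drop (k + 1) = w.drop (i + (k + 1)) := List.drop_drop
        have e : i + (k + 1) = i + k + 1 := by omega
        rw [e] at hdd
        have hih := ih w (i + k + 1) (by omega)
        rw [dfsL]
        rw [dif_neg (by simp [hl])]
        simp only [hf]
        have hhd : (w.drop i).head? = some c := by rw [hl]; rfl
        have hbma : i + k + 1 - i = k + 1 := by omega
        by_cases hc : c = '('
        · -- correct segment: prefix piece is the segment itself, suffix piece empty
          have hic : isCorrectL ((w.drop i).take (k + 1)) 0 = true := by
            rw [hl] at hf ⊢
            simp only [findSplit, hc] at hf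
            norm_num at hf
            rcases hf with ⟨j, hj, rfl⟩
            simp only [List.take_succ_cons, isCorrectL, hc]
            norm_num
            exact isCorrect_pos rest 1 j (by norm_num) hj
          simp only [hic, if_pos]
          rw [hdd] at *
          rw [hih]
          simp [emitB, hhd, hc, hbma, List.append_assoc]
        · -- incorrect segment (starts with a non-'(' character)
          have hic : isCorrectL ((w.drop i).take (k + 1)) 0 = false := by
            rw [hl]
            simp only [List.take_succ_cons, isCorrectL, hc]
            norm_num
          simp only [hic]
          rw [hdd] at *
          rw [hih]
          have hcond : (true && ((w.drop i).head? == some '(')) = false := by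
            simp [hhd, hc]
          have htk : ((w.drop i).take (k + 1)).drop 1 = (w.drop (i + 1)).take k := by
            rw [List.drop_take, List.drop_drop]
            norm_num
          have htl : ((w.drop i).take (k + 1)).length = k + 1 := by
            rw [List.length_take, List.length_drop]
            omega
          have htt : ((w.drop (i + 1)).take k).take (k + 1 - 2) = (w.drop (i + 1)).take (k - 1) := by
            rw [List.take_take]
            congr 1
            omega
          have e3 : i + k + 1 - 1 - (i + 1) = k - 1 := by omega
          simp only [emitB, hcond, Bool.false_eq_true, if_false]
          simp only [htk, htl, htt, e3, List.flatten_cons, List.reverse_cons,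
            List.flatten_append, List.flatten_nil]
          (simp [List.append_assoc]; rfl)

-- ===== VERDICT (by name: the statement is the Claim_ definition above) =====
theorem dfs_spec : Claim_equal_dfs := by
  intro w _
  have h := dfsL_eq_segs w.toList.length w.toList 0 (by omega)
  rw [List.drop_zero] at h
  show String.ofList (dfsL w.toList) =
    String.ofList ((emitB w.toList (segsB w.toList)).1.flatten ++
      (emitB w.toList (segsB w.toList)).2.reverse.flatten)
  rw [h, segsB_eq]
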